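-- pv_equiv track=rewrite | github.com/The-Log/Development | crypto/caesar-sub-cipher/decoder.py | frequent_double_letters
-- ===== SOURCE A (Python) =====
-- from collections import Counter
--
-- def prepare_string(s, alphabet):
--     prepared = ""
--     for i in list(s.upper()):
--         if (i in alphabet):
--             prepared = prepared + i
--     return prepared
--
-- def frequent_double_letters(text, alphabet):
--     """ return a list of tuples of most common double letters in 'text'"""
--     text = prepare_string(text, alphabet)
--     bigraphs = []
--     for index in range(len(text) - 1):
--         if text[index:index+1] == text[index+1:index+2]:
--             bigraphs.append(text[index:index + 2])
--     c = Counter(bigraphs)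
--     return c.most_common(4)
-- ===== SOURCE B (Python) =====
-- from collections import Counter
-- from itertools import groupby
--
-- def frequent_double_letters(text, alphabet):
--     """ return a list of tuples of most common double letters in 'text'"""
--     prepared = "".join(c for c in text.upper() if c in alphabet)
--     counts = Counter()
--     for ch, grp in groupby(prepared):
--         run_len = sum(1 for _ in grp)
--         if run_len >= 2:
--             counts[ch * 2] += run_len - 1
--     return counts.most_common(4)
-- ===== Notes on version B (the rewrite author's own statement) =====
-- stated objective: alternative
-- what changed: Replaces the index-by-index slice comparison over every adjacent pair (building an explicit list of doubled bigrams and counting it) by grouping the prepared string into maximal runs with itertools.groupby and adding run_len-1 per run directly to a Counter in run order.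
import Mathlib
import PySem

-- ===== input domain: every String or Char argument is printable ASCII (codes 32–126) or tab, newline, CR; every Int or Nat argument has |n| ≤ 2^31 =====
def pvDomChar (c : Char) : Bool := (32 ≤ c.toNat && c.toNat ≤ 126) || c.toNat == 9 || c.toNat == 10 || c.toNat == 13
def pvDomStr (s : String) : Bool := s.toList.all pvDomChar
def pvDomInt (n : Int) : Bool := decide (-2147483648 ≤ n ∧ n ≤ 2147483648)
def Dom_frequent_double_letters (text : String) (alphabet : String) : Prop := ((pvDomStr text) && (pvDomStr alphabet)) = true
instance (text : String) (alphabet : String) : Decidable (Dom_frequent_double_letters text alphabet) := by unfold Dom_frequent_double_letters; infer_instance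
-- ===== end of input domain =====

-- B replaces A's adjacent-index slice scan (building a list of doubled bigrams, then Counter)
-- by grouping the prepared string into maximal runs and adding (run length - 1) per run to the
-- counter in run order; objective: alternative decomposition, same cost.

-- ===== PORT A =====
def prepare_string (s : String) (alphabet : String) : String :=
  String.ofList ((PySem.Str.upper s).toList.foldl
    (fun prepared i => if PySem.Chars.isIn [i] alphabet.toList then prepared ++ [i] else prepared) [])

def frequent_double_letters (text : String) (alphabet : String) : List (String × Int) :=
  let t := prepare_string text alphabet
  let bigraphs := (PySem.List.pyRange 0 (PySem.Str.len t - 1) 1).foldl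
    (fun acc index =>
      if PySem.Str.slice t (some index) (some (index + 1))
           == PySem.Str.slice t (some (index + 1)) (some (index + 2))
      then acc ++ [PySem.Str.slice t (some index) (some (index + 2))]
      else acc) []
  let c := PySem.Dict.counter bigraphs
  (PySem.List.sorted c.items (fun p => p.2) true).take 4

-- ===== PORT B =====
-- maximal runs of equal adjacent characters, as (char, run length) in order (itertools.groupby)
def pvRuns : List Char → List (Char × Nat)
  | [] => []
  | a :: rest =>
      (a, (rest.takeWhile (a == ·)).length + 1) :: pvRuns (rest.dropWhile (a == ·))
  termination_by l => l.length
  decreasing_by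
    have := List.length_dropWhile_le (a == ·) rest
    simp; omega

def frequent_double_letters_alt (text : String) (alphabet : String) : List (String × Int) :=
  let prepared := (PySem.Str.upper text).toList.filter
    (fun c => PySem.Chars.isIn [c] alphabet.toList)
  let counts := (pvRuns prepared).foldl
    (fun d p => if 2 ≤ p.2
      then d.modify (String.ofList [p.1, p.1]) 0 (· + ((p.2 : Int) - 1))
      else d)
    PySem.Dict.empty
  (PySem.List.sorted counts.items (fun p => p.2) true).take 4

-- ===== PRECONDITION & SPEC =====
def Spec_frequent_double_letters (text : String) (alphabet : String) (out : List (String × Int)) : Prop := out = frequent_double_letters_alt text alphabet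
instance (text : String) (alphabet : String) (out : List (String × Int)) : Decidable (Spec_frequent_double_letters text alphabet out) := by unfold Spec_frequent_double_letters; infer_instance

-- ===== CLAIM (what is proved, stated in full; the proofs are below) =====
def Claim_equal_frequent_double_letters : Prop := ∀ (text : String) (alphabet : String), Dom_frequent_double_letters text alphabet → Spec_frequent_double_letters text alphabet (frequent_double_letters text alphabet)

-- ===== LEMMAS AND PROOFS =====

-- A's bigram scan, structurally: the doubled bigrams of adjacent equal characters, in order
def pvPairs : List Char → List String
  | a :: b :: t => (if a = b then [String.ofList [a, b]] else []) ++ pvPairs (b :: t)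
  | _ => []

-- A's loop body at index k, after slices are reduced to drop/take
def pvG (l : List Char) (acc : List String) (k : Nat) : List String :=
  if (l.drop k).take 1 = (l.drop (k + 1)).take 1
  then acc ++ [String.ofList ((l.drop k).take 2)]
  else acc

lemma pvG_shift (a : Char) (l : List Char) (acc : List String) (k : Nat) :
    pvG (a :: l) acc (k + 1) = pvG l acc k := by
  simp [pvG]

lemma range_fold_pairs :
    ∀ (l : List Char) (acc : List String),
      (List.range (l.length - 1)).foldl (pvG l) acc = acc ++ pvPairs l := by
  intro l
  induction l with
  | nil => intro acc; simp [pvPairs]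
  | cons a rest ih =>
      cases rest with
      | nil => intro acc; simp [pvPairs]
      | cons b t =>
          intro acc
          have hlen : (a :: b :: t).length - 1 = t.length + 1 := by simp
          rw [hlen, List.range_succ_eq_map, List.foldl_cons, List.foldl_map]
          have hbody : ∀ (acc' : List String) (k : Nat),
              pvG (a :: b :: t) acc' (k + 1) = pvG (b :: t) acc' k := by
            intro acc' k; exact pvG_shift a (b :: t) acc' k
          calc (List.range t.length).foldl (fun acc' k => pvG (a :: b :: t) acc' (k + 1))
                 (pvG (a :: b :: t) acc 0)
              = (List.range t.length).foldl (pvG (b :: t)) (pvG (a :: b :: t) acc 0) := by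
                apply PySem.List.foldl_congr_mem
                intro acc' k _
                exact hbody acc' k
            _ = pvG (a :: b :: t) acc 0 ++ pvPairs (b :: t) := by
                have := ih (pvG (a :: b :: t) acc 0)
                simpa using this
            _ = acc ++ pvPairs (a :: b :: t) := by
                by_cases hab : a = b
                · simp [pvG, pvPairs, hab]
                · simp [pvG, pvPairs, hab]

lemma pairs_run (a : Char) :
    ∀ (pre suf : List Char), (∀ x ∈ pre, x = a) → (∀ c t, suf = c :: t → c ≠ a) →
      pvPairs (a :: (pre ++ suf))
        = List.replicate pre.length (String.ofList [a, a]) ++ pvPairs suf := by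
  intro pre
  induction pre with
  | nil =>
      intro suf _ hsuf
      cases suf with
      | nil => simp [pvPairs]
      | cons c t =>
          have hca : c ≠ a := hsuf c t rfl
          have hac : ¬ a = c := fun h => hca h.symm
          simp [pvPairs, hac]
  | cons x pre' ih =>
      intro suf hpre hsuf
      have hx : x = a := hpre x (by simp)
      subst hx
      have h1 : pvPairs (x :: (x :: pre') ++ suf)
          = [String.ofList [x, x]] ++ pvPairs (x :: (pre' ++ suf)) := by
        simp [pvPairs]
      have h2 := ih suf (fun y hy => hpre y (by simp [hy])) hsuf
      simp only [List.cons_append] at h1 ⊢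
      rw [h1, h2]
      simp [List.replicate_succ]

lemma dropWhile_head_ne (a : Char) (rest : List Char) :
    ∀ c t, rest.dropWhile (a == ·) = c :: t → c ≠ a := by
  intro c t h hca
  have := List.head?_dropWhile_not (a == ·) rest
  rw [h] at this
  simp [hca] at this

lemma pvPairs_eq_flat :
    ∀ (l : List Char),
      pvPairs l = (pvRuns l).flatMap
        (fun p => List.replicate (p.2 - 1) (String.ofList [p.1, p.1]))
  | [] => by simp [pvRuns, pvPairs]
  | a :: rest => by
      rw [pvRuns]
      have hsplit : rest = rest.takeWhile (a == ·) ++ rest.dropWhile (a == ·) :=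
        (List.takeWhile_append_dropWhile (p := (a == ·)) (l := rest)).symm
      have hpre : ∀ x ∈ rest.takeWhile (a == ·), x = a := by
        intro x hx
        have := List.mem_takeWhile_imp hx
        exact (eq_of_beq this).symm
      have hrec := pvPairs_eq_flat (rest.dropWhile (a == ·))
      calc pvPairs (a :: rest)
          = pvPairs (a :: (rest.takeWhile (a == ·) ++ rest.dropWhile (a == ·))) := by
            rw [← hsplit]
        _ = List.replicate (rest.takeWhile (a == ·)).length (String.ofList [a, a])
              ++ pvPairs (rest.dropWhile (a == ·)) :=
            pairs_run a _ _ hpre (dropWhile_head_ne a rest)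
        _ = _ := by
            rw [hrec, List.flatMap_cons]
            simp only [Nat.add_sub_cancel]
  termination_by l => l.length
  decreasing_by
    have := List.length_dropWhile_le (a == ·) rest
    simp; omega

lemma foldl_modify_replicate (x : String) :
    ∀ (n : Nat) (d : PySem.Dict String Int),
      (List.replicate n x).foldl (fun d y => d.modify y 0 (· + 1)) d
        = if n = 0 then d else d.modify x 0 (· + (n : Int)) := by
  intro n
  induction n with
  | zero => intro d; simp
  | succ m ih =>
      intro d
      rw [List.replicate_succ, List.foldl_cons, ih]
      by_cases hm : m = 0
      · simp [hm]
      · rw [if_neg hm, if_neg (Nat.succ_ne_zero m)]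
        simp only [PySem.Dict.modify, PySem.Dict.insert_insert_self, PySem.Dict.getD_insert_self]
        congr 1
        push_cast
        ring

lemma pvRuns_pos : ∀ (l : List Char), ∀ p ∈ pvRuns l, 1 ≤ p.2
  | [] => by simp [pvRuns]
  | a :: rest => by
      rw [pvRuns]
      intro p hp
      rcases List.mem_cons.1 hp with h | h
      · subst h; simp
      · exact pvRuns_pos (rest.dropWhile (a == ·)) p h
  termination_by l => l.length
  decreasing_by
    have := List.length_dropWhile_le (a == ·) rest
    simp; omega

lemma counter_runs :
    ∀ (rs : List (Char × Nat)) (d : PySem.Dict String Int), (∀ p ∈ rs, 1 ≤ p.2) →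
      (rs.flatMap (fun p => List.replicate (p.2 - 1) (String.ofList [p.1, p.1]))).foldl
          (fun d y => d.modify y 0 (· + 1)) d
        = rs.foldl
            (fun d p => if 2 ≤ p.2
              then d.modify (String.ofList [p.1, p.1]) 0 (· + ((p.2 : Int) - 1))
              else d) d := by
  intro rs
  induction rs with
  | nil => intro d _; simp
  | cons p rest ih =>
      intro d hpos
      have hp1 : 1 ≤ p.2 := hpos p (by simp)
      rw [List.flatMap_cons, List.foldl_append, foldl_modify_replicate]
      rw [List.foldl_cons]
      by_cases h2 : 2 ≤ p.2
      · have hne : p.2 - 1 ≠ 0 := by omega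
        have hcast : ((p.2 - 1 : Nat) : Int) = (p.2 : Int) - 1 := by
          push_cast [Nat.cast_sub hp1]; ring
        rw [if_neg hne, hcast, if_pos h2]
        exact ih _ (fun q hq => hpos q (by simp [hq]))
      · have h1 : p.2 - 1 = 0 := by omega
        rw [if_pos h1, if_neg h2]
        exact ih _ (fun q hq => hpos q (by simp [hq]))

lemma pvSlice (l : List Char) (a b : Int) (ha : 0 ≤ a) (hb : 0 ≤ b) :
    PySem.Chars.slice l (some a) (some b) = (l.drop a.toNat).take (b.toNat - a.toNat) := by
  simp only [PySem.Chars.slice_eq_listSlice]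
  exact PySem.List.slice_toNat l ha hb

lemma body_eq_pvG (l : List Char) (acc : List String) (k : Nat) :
    (if PySem.Str.slice (String.ofList l) (some ((0:Int) + (k:Int))) (some ((0:Int)+(k:Int) + 1))
           == PySem.Str.slice (String.ofList l) (some ((0:Int)+(k:Int) + 1)) (some ((0:Int)+(k:Int) + 2))
      then acc ++ [PySem.Str.slice (String.ofList l) (some ((0:Int)+(k:Int))) (some ((0:Int)+(k:Int) + 2))]
      else acc) = pvG l acc k := by
  have e1 : ((k:Int)).toNat = k := by omega
  have e2 : ((k:Int)+1).toNat = k+1 := by omega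
  have e3 : ((k:Int)+2).toNat = k+2 := by omega
  simp only [zero_add, PySem.Str.slice, String.toList_ofList]
  rw [pvSlice l (↑k) (↑k+1) (by positivity) (by positivity),
      pvSlice l (↑k+1) (↑k+2) (by positivity) (by positivity),
      pvSlice l (↑k) (↑k+2) (by positivity) (by positivity)]
  simp only [e1, e2, e3]
  have t1 : k+1-k = 1 := by omega
  have t2 : k+2-(k+1) = 1 := by omega
  have t3 : k+2-k = 2 := by omega
  simp only [t1, t2, t3]
  simp [pvG, beq_iff_eq, String.ofList_inj]

-- ===== VERDICT (by name: the statement is the Claim_ definition above) =====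
theorem frequent_double_letters_spec : Claim_equal_frequent_double_letters := by
  intro text alphabet _
  unfold Spec_frequent_double_letters frequent_double_letters frequent_double_letters_alt prepare_string
  dsimp only
  rw [PySem.List.foldl_append_if_eq_filter]
  simp only [List.nil_append]
  set l := (PySem.Str.upper text).toList.filter (fun c => PySem.Chars.isIn [c] alphabet.toList)
  have hlen : PySem.Str.len (String.ofList l) = (l.length : Int) := by
    simp [PySem.Str.len_eq]
  rw [hlen]
  have hr : PySem.List.pyRange 0 ((l.length : Int) - 1) 1
      = (List.range (l.length - 1)).map (fun k : Nat => (0:Int) + (k:Int)) := by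
    rw [PySem.List.pyRange_one]
    have h : ((l.length : Int) - 1 - 0).toNat = l.length - 1 := by omega
    rw [h]
  rw [hr, List.foldl_map]
  rw [PySem.List.foldl_congr_mem _ _ (pvG l) []
        (by intro acc k _; exact body_eq_pvG l acc k)]
  rw [range_fold_pairs l []]
  simp only [List.nil_append]
  rw [pvPairs_eq_flat, PySem.Dict.counter_eq_foldl, counter_runs _ _ (pvRuns_pos l)]
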